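-- pv_equiv track=rewrite | github.com/gcoombe/advent-of-code | 2018/02/02.py | part_1
-- ===== SOURCE A (Python) =====
-- def part_1(box_ids):
--     two_count = 0
--     three_count = 0
--
--     for box_id in box_ids:
--         if any([box_id.count(char) == 2 for char in set(box_id)]):
--             two_count += 1
--         if any([box_id.count(char) == 3 for char in set(box_id)]):
--             three_count += 1
--
--     return two_count * three_count
-- ===== SOURCE B (Python) =====
-- def part_1(box_ids):
--     two_count = 0
--     three_count = 0
--     for box_id in box_ids:
--         # sort the characters and collect run lengths in one pass
--         runs = []
--         prev = None
--         run = 0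
--         for c in sorted(box_id):
--             if c == prev:
--                 run += 1
--             else:
--                 if run:
--                     runs.append(run)
--                 prev, run = c, 1
--         if run:
--             runs.append(run)
--         if 2 in runs:
--             two_count += 1
--         if 3 in runs:
--             three_count += 1
--     return two_count * three_count
-- ===== Notes on version B (the rewrite author's own statement) =====
-- stated objective: faster
-- what changed: Per box_id, B sorts the characters once and scans consecutive equal runs to collect run lengths, then tests 2 and 3 for membership in those run lengths, replacing A's per-distinct-character .count() rescans over the whole string.
import Mathlib
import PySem

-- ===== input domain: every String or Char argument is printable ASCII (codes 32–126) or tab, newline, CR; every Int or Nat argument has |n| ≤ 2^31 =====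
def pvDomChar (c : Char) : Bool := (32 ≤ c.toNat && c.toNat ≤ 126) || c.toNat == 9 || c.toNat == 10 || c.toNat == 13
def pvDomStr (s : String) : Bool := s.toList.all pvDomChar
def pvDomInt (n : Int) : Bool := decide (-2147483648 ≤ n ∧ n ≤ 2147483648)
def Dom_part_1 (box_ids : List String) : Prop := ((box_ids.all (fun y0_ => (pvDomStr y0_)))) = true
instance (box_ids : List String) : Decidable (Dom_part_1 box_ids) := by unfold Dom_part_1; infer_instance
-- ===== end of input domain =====

-- B replaces A's per-distinct-char .count() scans by sort + one run-length scan; objective: alternative.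

-- ===== PORT A =====
def part_1 (box_ids : List String) : Int :=
  let r := box_ids.foldl (fun (acc : Int × Int) box_id =>
    let chars := box_id.toList
    let s : PySem.Set Char := PySem.Set.ofList chars
    let two := if (s.map fun ch => chars.count ch == 2).any id then acc.1 + 1 else acc.1
    let three := if (s.map fun ch => chars.count ch == 3).any id then acc.2 + 1 else acc.2
    (two, three)) (0, 0)
  r.1 * r.2

-- ===== PORT B =====
-- inner loop of Source B: accumulate the current run, emit it when the character changes
def pvRunGo (prev : Char) (run : Nat) : List Char → List Nat
  | [] => [run]
  | c :: rest => if c == prev then pvRunGo prev (run + 1) rest else run :: pvRunGo c 1 rest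

def pvRunLens : List Char → List Nat
  | [] => []
  | c :: rest => pvRunGo c 1 rest

def part_1_alt (box_ids : List String) : Int :=
  let r := box_ids.foldl (fun (acc : Int × Int) box_id =>
    let runs := pvRunLens (PySem.List.sorted box_id.toList (fun x => x) false)
    ((if runs.contains 2 then acc.1 + 1 else acc.1),
     (if runs.contains 3 then acc.2 + 1 else acc.2))) (0, 0)
  r.1 * r.2

-- ===== PRECONDITION & SPEC =====
def Spec_part_1 (box_ids : List String) (out : Int) : Prop := out = part_1_alt box_ids
instance (box_ids : List String) (out : Int) : Decidable (Spec_part_1 box_ids out) := by unfold Spec_part_1; infer_instance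

-- ===== CLAIM (what is proved, stated in full; the proofs are below) =====
def Claim_equal_part_1 : Prop := ∀ (box_ids : List String), Dom_part_1 box_ids → Spec_part_1 box_ids (part_1 box_ids)

-- ===== LEMMAS AND PROOFS =====

lemma count_cons_ne (d c : Char) (rest : List Char) (h : d ≠ c) :
    (c :: rest).count d = rest.count d := by
  simp [Ne.symm h]

lemma pvRunGo_spec (prev : Char) (run : Nat) (l : List Char)
    (hl : l.Pairwise (· ≤ ·)) (hprev : ∀ c ∈ l, prev ≤ c) (k : Nat) :
    k ∈ pvRunGo prev run l ↔ (k = run + l.count prev ∨ ∃ c ∈ l, c ≠ prev ∧ l.count c = k) := by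
  induction l generalizing prev run with
  | nil => simp [pvRunGo]
  | cons c rest ih =>
    rw [List.pairwise_cons] at hl
    obtain ⟨hc, hrest⟩ := hl
    by_cases hcp : c = prev
    · subst hcp
      simp only [pvRunGo, beq_self_eq_true, if_true]
      rw [ih c (run + 1) hrest hc]
      constructor
      · rintro (h | ⟨d, hd, hne, hk⟩)
        · left; simp; omega
        · right; exact ⟨d, List.mem_cons_of_mem _ hd, hne, by rw [count_cons_ne d c rest hne]; exact hk⟩
      · rintro (h | ⟨d, hd, hne, hk⟩)
        · left; simp at h; omega
        · right
          rcases List.mem_cons.mp hd with rfl | hd'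
          · exact absurd rfl hne
          · exact ⟨d, hd', hne, by rw [count_cons_ne d c rest hne] at hk; exact hk⟩
    · have hlt : prev < c := lt_of_le_of_ne (hprev c List.mem_cons_self) (Ne.symm hcp)
      have hnp : ∀ d ∈ rest, d ≠ prev := by
        intro d hd h
        exact absurd (h ▸ hc d hd) (not_le.mpr hlt)
      have hcount0 : (c :: rest).count prev = 0 := by
        rw [List.count_eq_zero]
        intro h
        rcases List.mem_cons.mp h with h' | h'
        · exact hcp h'.symm
        · exact hnp prev h' rfl
      have hbeq : (c == prev) = false := beq_eq_false_iff_ne.mpr hcp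
      simp only [pvRunGo, hbeq, Bool.false_eq_true, if_false]
      rw [List.mem_cons, ih c 1 hrest hc, hcount0]
      constructor
      · rintro (rfl | h | ⟨d, hd, hne, hk⟩)
        · left; omega
        · right
          refine ⟨c, List.mem_cons_self, hcp, ?_⟩
          simp; omega
        · right
          exact ⟨d, List.mem_cons_of_mem _ hd, hnp d hd, by rw [count_cons_ne d c rest hne]; exact hk⟩
      · rintro (h | ⟨d, hd, hne, hk⟩)
        · left; omega
        · rcases List.mem_cons.mp hd with rfl | hd'
          · right; left
            simp at hk; omega
          · by_cases hdc : d = c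
            · subst hdc
              right; left
              simp at hk
              omega
            · right; right
              exact ⟨d, hd', hdc, by rw [count_cons_ne d c rest hdc] at hk; exact hk⟩

lemma pvRunLens_mem_sorted (l : List Char) (hl : l.Pairwise (· ≤ ·)) (k : Nat) :
    k ∈ pvRunLens l ↔ ∃ c ∈ l, l.count c = k := by
  cases l with
  | nil => simp [pvRunLens]
  | cons c rest =>
    rw [List.pairwise_cons] at hl
    obtain ⟨hc, hrest⟩ := hl
    simp only [pvRunLens]
    rw [pvRunGo_spec c 1 rest hrest hc]
    constructor
    · rintro (h | ⟨d, hd, hne, hk⟩)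
      · exact ⟨c, List.mem_cons_self, by simp; omega⟩
      · exact ⟨d, List.mem_cons_of_mem _ hd, by rw [count_cons_ne d c rest hne]; exact hk⟩
    · rintro ⟨d, hd, hk⟩
      rcases List.mem_cons.mp hd with rfl | hd'
      · left; simp at hk; omega
      · by_cases hdc : d = c
        · subst hdc; left; simp at hk; omega
        · right; exact ⟨d, hd', hdc, by rw [count_cons_ne d c rest hdc] at hk; exact hk⟩

lemma string_bool (l : List Char) (k : Nat) :
    ((PySem.Set.ofList l).map fun ch => l.count ch == k).any id
      = (pvRunLens (PySem.List.sorted l (fun x => x) false)).contains k := by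
  have hperm : (PySem.List.sorted l (fun x => x) false).Perm l :=
    PySem.List.sorted_perm l (fun x => x) false
  rw [Bool.eq_iff_iff]
  simp only [List.any_eq_true, List.mem_map, id_eq, List.contains_eq_mem, decide_eq_true_eq]
  rw [pvRunLens_mem_sorted _ (PySem.List.sorted_pairwise l (fun x => x)) k]
  constructor
  · rintro ⟨b, ⟨c, hc, rfl⟩, hb⟩
    rw [beq_iff_eq] at hb
    exact ⟨c, hperm.mem_iff.mpr ((PySem.Set.mem_ofList l c).mp hc), by rw [hperm.count_eq]; exact hb⟩
  · rintro ⟨c, hc, hk⟩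
    refine ⟨_, ⟨c, (PySem.Set.mem_ofList l c).mpr (hperm.mem_iff.mp hc), rfl⟩, ?_⟩
    rw [beq_iff_eq, ← hperm.count_eq]; exact hk

-- ===== VERDICT (by name: the statement is the Claim_ definition above) =====
theorem part_1_spec : Claim_equal_part_1 := by
  intro box_ids _
  simp only [Spec_part_1, part_1, part_1_alt, string_bool]
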